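-- pv_equiv track=rewrite | github.com/maengjh0208/algorithm_coding_test | 인사고과.py | solution
-- ===== SOURCE A (Python) =====
-- def solution(scores: list):
--     target = scores[0]
--
--     scores.sort(key=lambda x: (-x[0], x[1]))
--     new_scores = [scores[0]]  # 인센티브 받는 사원 리스트
--
--     # 인센티브 받는 사원 골라내기
--     max_b = scores[0][1]
--     for i in range(1, len(scores)):
--         if scores[i][1] < max_b:
--             # 완호가 인센티브 못받는 경우 -1 리턴
--             if target == scores[i]: return -1
--         else:
--             new_scores.append(scores[i])
--             max_b = max(max_b, scores[i][1])
--
--     # 점수 합이 큰 순서대로 정렬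
--     new_scores.sort(key=lambda x: -sum(x))
--
--     rank = 1
--     for i in range(len(new_scores)):
--         if i != 0 and sum(new_scores[i - 1]) > sum(new_scores[i]):
--             rank = i + 1
--
--         # 완호의 등 수 리턴
--         if target == new_scores[i]:
--             return rank
-- ===== SOURCE B (Python) =====
-- # B: direct counting instead of sort+frontier scan. Returns -1 iff someone strictly
-- # dominates Wanho in both scores; otherwise rank = 1 + number of non-dominated
-- # employees whose score-sum strictly exceeds Wanho's. Note: A sorts `scores` in
-- # place; B does not mutate its argument (equivalence claimed for the return value).
-- def solution(scores: list):
--     t = scores[0]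
--     if any(s[0] > t[0] and s[1] > t[1] for s in scores):
--         return -1
--     ts = sum(t)
--     return 1 + sum(
--         1
--         for s in scores
--         if sum(s) > ts and not any(o[0] > s[0] and o[1] > s[1] for o in scores)
--     )
-- ===== Notes on version B (the rewrite author's own statement) =====
-- stated objective: simpler
-- what changed: Replaces A's two sorts plus frontier-building/rank-scanning loops with direct counting: -1 iff someone strictly dominates employee 0 in both scores, else 1 + count of non-dominated employees with strictly larger score-sum (B also does not mutate the input list, while A sorts it in place).
import Mathlib
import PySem

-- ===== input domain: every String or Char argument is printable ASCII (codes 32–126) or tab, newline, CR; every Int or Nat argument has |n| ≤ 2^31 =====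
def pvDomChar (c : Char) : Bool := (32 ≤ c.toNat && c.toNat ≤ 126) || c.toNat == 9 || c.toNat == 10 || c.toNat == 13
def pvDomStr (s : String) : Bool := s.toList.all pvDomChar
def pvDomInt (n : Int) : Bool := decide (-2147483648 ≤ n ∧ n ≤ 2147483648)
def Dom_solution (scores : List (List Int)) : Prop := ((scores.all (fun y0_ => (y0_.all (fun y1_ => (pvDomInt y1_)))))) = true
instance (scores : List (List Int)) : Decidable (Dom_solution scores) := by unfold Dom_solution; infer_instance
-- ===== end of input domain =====

-- B computes the rank by direct domination counting instead of A's sort + frontier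
-- scan; A sorts `scores` in place, B does not mutate it — equivalence is about the
-- return value only.


-- ===== PORT A =====
-- x[0], x[1] are ported as List.getD 0/1 (exact for in-range nonnegative indices;
-- out-of-range would raise IndexError in Python and is excluded by Pre_solution).

-- first loop of A: drop dominated employees, return none at Wanho (= -1 in A)
def pvLoop1 (target : List Int) (rest kept : List (List Int)) (maxB : Int) :
    Option (List (List Int)) :=
  match rest with
  | [] => some kept
  | s :: rs =>
    if s.getD 1 0 < maxB then
      if target = s then none
      else pvLoop1 target rs kept maxB
    else pvLoop1 target rs (kept ++ [s]) (max maxB (s.getD 1 0))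

-- second loop of A: competition rank over the sum-sorted survivors
def pvLoop2 (target : List Int) (l : List (List Int)) (prevSum : Int) (i : Nat)
    (rank : Int) : Int :=
  match l with
  | [] => 0   -- unreachable under Pre_solution (A would fall off and return None)
  | x :: rs =>
    let rank' := if i ≠ 0 ∧ prevSum > x.sum then (i : Int) + 1 else rank
    if target = x then rank'
    else pvLoop2 target rs x.sum (i + 1) rank'

def solution (scores : List (List Int)) : Int :=
  let target := scores.getD 0 []
  let ss := PySem.List.sorted2 scores (fun x => -(x.getD 0 0)) (fun x => x.getD 1 0)
  match ss with
  | [] => 0   -- unreachable: Pre_solution requires scores ≠ []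
  | h :: t =>
    match pvLoop1 target t [h] (h.getD 1 0) with
    | none => -1
    | some kept => pvLoop2 target (PySem.List.sorted kept (fun x => -(x.sum))) 0 0 1

-- ===== PORT B =====
-- o strictly dominates s in both scores
def pvBeats (o s : List Int) : Bool :=
  decide (s.getD 0 0 < o.getD 0 0) && decide (s.getD 1 0 < o.getD 1 0)

def solution_alt (scores : List (List Int)) : Int :=
  let t := scores.getD 0 []
  if scores.any (fun s => pvBeats s t) then -1
  else
    let ts := t.sum
    1 + ((scores.filter
          (fun s => decide (ts < s.sum) && !(scores.any (fun o => pvBeats o s)))).length : Int)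

-- ===== PRECONDITION & SPEC =====
-- Exactly where the Python A returns: an empty `scores` or an inner list with fewer
-- than two entries raises IndexError in A (scores[0] / the sort key x[0], x[1]).
def Pre_solution (scores : List (List Int)) : Prop :=
  scores ≠ [] ∧ ∀ s ∈ scores, 2 ≤ s.length
instance (scores : List (List Int)) : Decidable (Pre_solution scores) := by
  unfold Pre_solution; infer_instance

def pvWitness_solution : List (List Int) := [[2, 2], [1, 4], [3, 2], [3, 2], [2, 1]]

def Spec_solution (scores : List (List Int)) (out : Int) : Prop := out = solution_alt scores
instance (scores : List (List Int)) (out : Int) : Decidable (Spec_solution scores out) := by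
  unfold Spec_solution; infer_instance

-- ===== CLAIM (what is proved, stated in full; the proofs are below) =====
def Claim_equal_solution : Prop :=
  ∀ (scores : List (List Int)), Dom_solution scores → Pre_solution scores →
    Spec_solution scores (solution scores)

-- ===== LEMMAS AND PROOFS =====

-- the (non-strict) lexicographic order of A's first sort key (-x[0], x[1])
def pvR (a b : List Int) : Prop :=
  -(a.getD 0 0) < -(b.getD 0 0) ∨ (-(a.getD 0 0) = -(b.getD 0 0) ∧ a.getD 1 0 ≤ b.getD 1 0)

theorem pvR_trans {a b c : List Int} (h1 : pvR a b) (h2 : pvR b c) : pvR a c := by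
  unfold pvR at *; rcases h1 with h1 | ⟨h1, h1'⟩ <;> rcases h2 with h2 | ⟨h2, h2'⟩ <;>
    simp_all <;> omega

-- sorted2's comparison implies pvR in the true case, its converse in the false case
theorem pvBefore_true {a b : List Int}
    (h : (decide (-(a.getD 0 0) < -(b.getD 0 0)) ||
      (!decide (-(b.getD 0 0) < -(a.getD 0 0)) && decide (a.getD 1 0 < b.getD 1 0))) = true) :
    pvR a b := by
  unfold pvR
  simp only [Bool.or_eq_true, Bool.and_eq_true, Bool.not_eq_eq_eq_not, Bool.not_true,
    decide_eq_true_eq, decide_eq_false_iff_not] at h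
  omega

theorem pvBefore_false {a b : List Int}
    (h : (decide (-(a.getD 0 0) < -(b.getD 0 0)) ||
      (!decide (-(b.getD 0 0) < -(a.getD 0 0)) && decide (a.getD 1 0 < b.getD 1 0))) = false) :
    pvR b a := by
  unfold pvR
  simp only [Bool.or_eq_false_iff, Bool.and_eq_false_iff, decide_eq_false_iff_not,
    Bool.not_eq_false', decide_eq_true_eq] at h
  omega

theorem pvInsertBy_pairwise (x : List Int) (l : List (List Int))
    (hl : l.Pairwise pvR) :
    (PySem.List.insertBy
      (fun a b => decide (-(a.getD 0 0) < -(b.getD 0 0)) ||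
        (!decide (-(b.getD 0 0) < -(a.getD 0 0)) && decide (a.getD 1 0 < b.getD 1 0)))
      x l).Pairwise pvR := by
  induction l with
  | nil => simp [PySem.List.insertBy]
  | cons y ys ih =>
    rw [List.pairwise_cons] at hl
    obtain ⟨hy, hys⟩ := hl
    simp only [PySem.List.insertBy]
    split
    · rename_i hb
      have hxy : pvR x y := pvBefore_true hb
      refine List.pairwise_cons.mpr ⟨?_, List.pairwise_cons.mpr ⟨hy, hys⟩⟩
      intro z hz
      rcases List.mem_cons.mp hz with rfl | hz
      · exact hxy
      · exact pvR_trans hxy (hy _ hz)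
    · rename_i hb
      have hyx : pvR y x := pvBefore_false (by simpa using hb)
      refine List.pairwise_cons.mpr ⟨?_, ih hys⟩
      intro z hz
      rcases (PySem.List.mem_insertBy _ _ _ _).mp hz with rfl | hz
      · exact hyx
      · exact hy _ hz

theorem pvSorted2_pairwise (xs : List (List Int)) :
    (PySem.List.sorted2 xs (fun x => -(x.getD 0 0)) (fun x => x.getD 1 0)).Pairwise pvR := by
  show (List.foldl _ [] xs).Pairwise pvR
  have key : ∀ (acc : List (List Int)), acc.Pairwise pvR →
      (List.foldl (fun acc x => PySem.List.insertBy
        (fun a b => decide (-(a.getD 0 0) < -(b.getD 0 0)) ||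
          (!decide (-(b.getD 0 0) < -(a.getD 0 0)) && decide (a.getD 1 0 < b.getD 1 0)))
        x acc) acc xs).Pairwise pvR := by
    induction xs with
    | nil => intro acc h; exact h
    | cons x xs ih => intro acc h; exact ih _ (pvInsertBy_pairwise x acc h)
  exact key [] List.Pairwise.nil

theorem pvLoop1_cons (target s : List Int) (rs kept : List (List Int)) (maxB : Int) :
    pvLoop1 target (s :: rs) kept maxB =
      if s.getD 1 0 < maxB then
        (if target = s then none else pvLoop1 target rs kept maxB)
      else pvLoop1 target rs (kept ++ [s]) (max maxB (s.getD 1 0)) := rfl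

theorem pvLoop2_cons (target x : List Int) (rs : List (List Int)) (prevSum : Int)
    (i : Nat) (rank : Int) :
    pvLoop2 target (x :: rs) prevSum i rank =
      (if target = x then (if i ≠ 0 ∧ prevSum > x.sum then (i : Int) + 1 else rank)
       else pvLoop2 target rs x.sum (i + 1)
         (if i ≠ 0 ∧ prevSum > x.sum then (i : Int) + 1 else rank)) := rfl

-- characterization of A's first loop: it returns none exactly when the target is
-- strictly dominated by some element, and otherwise the non-dominated sublist
theorem pvLoop1_char (target : List Int) (S : List (List Int)) (hS : S.Pairwise pvR)
    (htS : target ∈ S) :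
    ∀ (rest P kept : List (List Int)) (maxB : Int),
      S = P ++ rest →
      (∀ x ∈ P, x.getD 1 0 ≤ maxB) →
      (∃ k ∈ P, k.getD 1 0 = maxB) →
      kept = P.filter (fun s => !S.any (fun y => pvBeats y s)) →
      (S.any (fun y => pvBeats y target) = true → target ∉ P) →
      pvLoop1 target rest kept maxB =
        if S.any (fun y => pvBeats y target) = true then none
        else some (S.filter (fun s => !S.any (fun y => pvBeats y s))) := by
  intro rest
  induction rest with
  | nil =>
    intro P kept maxB hSP _ _ hkept h6
    rw [List.append_nil] at hSP
    subst hSP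
    rw [if_neg (fun hDT => h6 hDT htS)]
    simp [pvLoop1, hkept]
  | cons s rs ih =>
    intro P kept maxB hSP hA2 hA3 hkept h6
    have hPs : ∀ a ∈ P, pvR a s := by
      intro a ha
      have := (List.pairwise_append.mp (hSP ▸ hS)).2.2 a ha s (List.mem_cons_self)
      exact this
    by_cases hlt : s.getD 1 0 < maxB
    · -- s is dropped; it is dominated by the maxB witness
      obtain ⟨k, hkP, hkB⟩ := hA3
      have hks : pvBeats k s = true := by
        have hR := hPs k hkP
        unfold pvR at hR
        unfold pvBeats
        simp only [Bool.and_eq_true, decide_eq_true_eq]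
        omega
      have hdom_s : S.any (fun y => pvBeats y s) = true :=
        List.any_eq_true.mpr ⟨k, hSP ▸ List.mem_append_left _ hkP, hks⟩
      by_cases hts : target = s
      · subst hts
        rw [if_pos hdom_s, pvLoop1_cons, if_pos hlt, if_pos rfl]
      · rw [pvLoop1_cons, if_pos hlt, if_neg hts]
        refine ih (P ++ [s]) kept maxB (by simpa using hSP) ?_ ?_ ?_ ?_
        · intro x hx
          rcases List.mem_append.mp hx with hx | hx
          · exact hA2 x hx
          · simp only [List.mem_singleton] at hx; subst hx; omega
        · exact ⟨k, List.mem_append_left _ hkP, hkB⟩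
        · rw [hkept, List.filter_append]
          simp [hdom_s]
        · intro hDT
          simp only [List.mem_append, List.mem_singleton, not_or]
          exact ⟨h6 hDT, hts⟩
    · -- s is kept; it is not dominated
      have hdom_s : S.any (fun y => pvBeats y s) = false := by
        rw [List.any_eq_false]
        intro y hy
        rcases List.mem_append.mp (hSP ▸ hy) with hyP | hyr
        · have := hA2 y hyP
          unfold pvBeats
          simp only [Bool.not_eq_true, Bool.and_eq_false_iff, decide_eq_false_iff_not]
          omega
        · rcases List.mem_cons.mp hyr with rfl | hyr
          · unfold pvBeats
            simp only [Bool.not_eq_true, Bool.and_eq_false_iff, decide_eq_false_iff_not]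
            omega
          · have hR : pvR s y :=
              (List.pairwise_cons.mp (List.pairwise_append.mp (hSP ▸ hS)).2.1).1 y hyr
            unfold pvR at hR
            unfold pvBeats
            simp only [Bool.not_eq_true, Bool.and_eq_false_iff, decide_eq_false_iff_not]
            omega
      rw [pvLoop1_cons, if_neg hlt]
      refine ih (P ++ [s]) (kept ++ [s]) _ (by simpa using hSP) ?_ ?_ ?_ ?_
      · intro x hx
        rcases List.mem_append.mp hx with hx | hx
        · exact le_trans (hA2 x hx) (le_max_left _ _)
        · simp only [List.mem_singleton] at hx; subst hx; exact le_max_right _ _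
      · exact ⟨s, List.mem_append_right _ (List.mem_singleton_self s),
          by rw [max_eq_right (le_of_not_gt hlt)]⟩
      · rw [hkept, List.filter_append]
        simp [hdom_s]
      · intro hDT
        simp only [List.mem_append, List.mem_singleton, not_or]
        refine ⟨h6 hDT, ?_⟩
        rintro rfl
        rw [hdom_s] at hDT
        exact Bool.false_ne_true hDT

-- characterization of A's second loop: competition rank of the target in the
-- sum-descending list = 1 + the number of elements with strictly larger sum
theorem pvLoop2_char (target : List Int) (ns : List (List Int))
    (hns : ns.Pairwise (fun a b => -(a.sum) ≤ -(b.sum))) :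
    ∀ (l done : List (List Int)) (prevSum rank : Int),
      ns = done ++ l → target ∈ l →
      (done = [] → rank = 1) →
      (done ≠ [] → (∃ d ∈ done, d.sum = prevSum) ∧ (∀ y ∈ done, prevSum ≤ y.sum) ∧
        rank = 1 + (done.countP (fun y => decide (prevSum < y.sum)) : Int)) →
      pvLoop2 target l prevSum done.length rank =
        1 + (ns.countP (fun y => decide (target.sum < y.sum)) : Int) := by
  intro l
  induction l with
  | nil => intro done prevSum rank _ htl; exact absurd htl (List.not_mem_nil)
  | cons x l' ih =>
    intro done prevSum rank hsplit htl h0 h1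
    have hdx : ∀ y ∈ done, x.sum ≤ y.sum := by
      intro y hy
      have := (List.pairwise_append.mp (hsplit ▸ hns)).2.2 y hy x List.mem_cons_self
      omega
    have hxl' : ∀ y ∈ l', y.sum ≤ x.sum := by
      intro y hy
      have := (List.pairwise_cons.mp (List.pairwise_append.mp (hsplit ▸ hns)).2.1).1 y hy
      omega
    have hrank' : (if done.length ≠ 0 ∧ prevSum > x.sum then (done.length : Int) + 1 else rank)
        = 1 + (done.countP (fun y => decide (x.sum < y.sum)) : Int) := by
      by_cases hd : done = []
      · subst hd
        simp [h0 rfl]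
      · obtain ⟨⟨d, hdmem, hdsum⟩, hall, hrk⟩ := h1 hd
        by_cases hgt : prevSum > x.sum
        · rw [if_pos ⟨fun h => hd (List.length_eq_zero_iff.mp h), hgt⟩]
          have hcnt : done.countP (fun y => decide (x.sum < y.sum)) = done.length :=
            List.countP_eq_length.mpr (fun y hy => by
              have := hall y hy
              simp only [decide_eq_true_eq]
              omega)
          rw [hcnt]
          omega
        · rw [if_neg (by tauto)]
          have hxp : x.sum = prevSum := le_antisymm (hdsum ▸ hdx d hdmem) (le_of_not_gt hgt)
          rw [hrk, hxp]
    have hl'cnt : l'.countP (fun y => decide (x.sum < y.sum)) = 0 :=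
      List.countP_eq_zero.mpr (fun y hy => by
        have := hxl' y hy
        simp only [decide_eq_true_eq]
        omega)
    rw [pvLoop2_cons]
    by_cases htx : target = x
    · subst htx
      rw [if_pos rfl, hrank', hsplit, List.countP_append, List.countP_cons]
      simp [hl'cnt]
    · rw [if_neg htx]
      have hrec := ih (done ++ [x]) x.sum
        (if done.length ≠ 0 ∧ prevSum > x.sum then (done.length : Int) + 1 else rank)
        (by simpa using hsplit)
        (by rcases List.mem_cons.mp htl with rfl | h; exact absurd rfl htx; exact h)
        (by intro h; exact absurd h (by simp))
        (by
          intro _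
          refine ⟨⟨x, List.mem_append_right _ (List.mem_singleton_self x), rfl⟩, ?_, ?_⟩
          · intro y hy
            rcases List.mem_append.mp hy with hy | hy
            · exact hdx y hy
            · simp only [List.mem_singleton] at hy; subst hy; exact le_refl _
          · rw [List.countP_append, hrank']
            simp)
      rw [List.length_append, List.length_singleton] at hrec
      exact hrec

-- transfer of `any` along a permutation
theorem pvAny_perm {l₁ l₂ : List (List Int)} (h : l₁.Perm l₂) (f : List Int → Bool) :
    l₁.any f = l₂.any f := by
  refine Bool.eq_iff_iff.mpr ?_
  rw [List.any_eq_true, List.any_eq_true]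
  constructor
  · rintro ⟨y, hy, hf⟩; exact ⟨y, h.mem_iff.mp hy, hf⟩
  · rintro ⟨y, hy, hf⟩; exact ⟨y, h.mem_iff.mpr hy, hf⟩

-- the head of the key-sorted list is never strictly dominated
theorem pvHead_not_dom (S : List (List Int)) (h : List Int) (tl : List (List Int))
    (hS : S.Pairwise pvR) (hcons : S = h :: tl) :
    S.any (fun y => pvBeats y h) = false := by
  rw [List.any_eq_false]
  intro y hy
  rcases List.mem_cons.mp (hcons ▸ hy) with rfl | hy
  · unfold pvBeats
    simp only [Bool.not_eq_true, Bool.and_eq_false_iff, decide_eq_false_iff_not]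
    omega
  · have hR : pvR h y := (List.pairwise_cons.mp (hcons ▸ hS)).1 y hy
    unfold pvR at hR
    unfold pvBeats
    simp only [Bool.not_eq_true, Bool.and_eq_false_iff, decide_eq_false_iff_not]
    omega

-- the target (the value of scores[0] before A's in-place sort) survives the first loop
-- and the remaining arithmetic matches B's direct counts
theorem pvMain (scores : List (List Int)) (hne : scores ≠ []) :
    solution scores = solution_alt scores := by
  have ht : scores.getD 0 [] ∈ scores := by
    cases scores with
    | nil => exact absurd rfl hne
    | cons c cs => exact List.mem_cons_self
  have hperm : (PySem.List.sorted2 scores (fun x => -(x.getD 0 0))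
      (fun x => x.getD 1 0)).Perm scores :=
    PySem.List.sorted2_perm scores _ _ false
  have hSp := pvSorted2_pairwise scores
  have htS : scores.getD 0 [] ∈ PySem.List.sorted2 scores (fun x => -(x.getD 0 0))
      (fun x => x.getD 1 0) := hperm.mem_iff.mpr ht
  cases hS : PySem.List.sorted2 scores (fun x => -(x.getD 0 0)) (fun x => x.getD 1 0) with
  | nil => exact absurd (hS ▸ hperm).nil_eq.symm hne
  | cons h tl =>
    rw [hS] at hSp htS hperm
    have hhead := pvHead_not_dom _ h tl hSp rfl
    have hloop1 := pvLoop1_char (scores.getD 0 []) (h :: tl) hSp htS tl [h] [h]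
      (h.getD 1 0) rfl
      (by intro x hx; rw [List.mem_singleton] at hx; subst hx; exact le_refl _)
      ⟨h, List.mem_singleton_self h, rfl⟩
      (by rw [List.filter_singleton, hhead]; rfl)
      (by
        intro hDT htmem
        rw [List.mem_singleton] at htmem
        rw [htmem, hhead] at hDT
        exact Bool.false_ne_true hDT)
    simp only [solution, solution_alt, hS]
    rw [pvAny_perm hperm (fun s => pvBeats s (scores.getD 0 []))] at hloop1
    by_cases hDT : scores.any (fun s => pvBeats s (scores.getD 0 [])) = true
    · rw [if_pos hDT] at hloop1
      rw [hloop1, if_pos hDT]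
    · rw [if_neg hDT] at hloop1
      rw [hloop1, if_neg hDT]
      have hDT' : scores.any (fun s => pvBeats s (scores.getD 0 [])) = false :=
        Bool.not_eq_true _ ▸ hDT
      have htk : scores.getD 0 [] ∈ (h :: tl).filter
          (fun s => !(h :: tl).any (fun y => pvBeats y s)) := by
        refine List.mem_filter.mpr ⟨htS, ?_⟩
        rw [pvAny_perm hperm (fun y => pvBeats y (scores.getD 0 [])), hDT']
        rfl
      have hpw := PySem.List.sorted_pairwise
        ((h :: tl).filter (fun s => !(h :: tl).any (fun y => pvBeats y s)))
        (fun x => -(x.sum))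
      have nsperm := PySem.List.sorted_perm
        ((h :: tl).filter (fun s => !(h :: tl).any (fun y => pvBeats y s)))
        (fun x => -(x.sum)) false
      have hrec := pvLoop2_char (scores.getD 0 [])
        (PySem.List.sorted ((h :: tl).filter (fun s => !(h :: tl).any (fun y => pvBeats y s)))
          (fun x => -(x.sum)))
        hpw
        (PySem.List.sorted ((h :: tl).filter (fun s => !(h :: tl).any (fun y => pvBeats y s)))
          (fun x => -(x.sum)))
        [] 0 1 rfl (nsperm.mem_iff.mpr htk) (fun _ => rfl) (fun hc => absurd rfl hc)
      rw [List.length_nil] at hrec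
      refine Eq.trans (b := pvLoop2 (scores.getD 0 [])
        (PySem.List.sorted ((h :: tl).filter (fun s => !(h :: tl).any (fun y => pvBeats y s)))
          (fun x => -(x.sum))) 0 0 1) rfl ?_
      rw [hrec]
      congr 1
      rw [nsperm.countP_eq, List.countP_filter, hperm.countP_eq,
        List.countP_eq_length_filter]
      refine congrArg (fun n : Nat => (n : Int))
        (congrArg List.length (List.filter_congr ?_))
      intro s hsm
      rw [pvAny_perm hperm (fun y => pvBeats y s)]

-- ===== VERDICT (by name: the statement is the Claim_ definition above) =====
theorem solution_spec : Claim_equal_solution := by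
  unfold Claim_equal_solution
  intro scores _ hpre
  unfold Spec_solution
  exact pvMain scores hpre.1
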